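-- pv_equiv track=rewrite | github.com/inetsmol/lesta_replays | replays/management/commands/load_tankopedia.py | _infer_nation_from_vehicle_id
-- ===== SOURCE A (Python) =====
-- from typing import Iterable, List, Optional
--
-- def _infer_nation_from_vehicle_id(veh_id: str) -> Optional[str]:
--     """
--     Пытаемся определить нацию по префиксу vehicleId.
--     Примеры: S10_... -> sweden, Pl14_... -> poland, It02_... -> italy, GB01_... -> uk и т.п.
--     Сначала проверяем длинные префиксы, потом короткие.
--     """
--     prefix_map = {
--         "Un": "intunion",
--         "GB": "uk",
--         "Ch": "china",
--         "Cz": "czech",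
--         "Pl": "poland",
--         "It": "italy",
--         "S": "sweden",
--         "J": "japan",
--         "F": "france",
--         "G": "germany",
--         "R": "ussr",
--         "A": "usa",
--     }
--     # нормализуем id к безопасному виду
--     v = (veh_id or "").strip()
--     # длинные префиксы
--     for p in ("Un", "GB", "Ch", "Cz", "Pl", "It"):
--         if v.startswith(p + "_") or v.startswith(p):
--             return prefix_map[p]
--     # короткие префиксы
--     for p in ("S", "J", "F", "G", "R", "A"):
--         if v.startswith(p + "_") or v.startswith(p):
--             return prefix_map[p]
--     return None
-- ===== SOURCE B (Python) =====
-- from typing import Optional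
--
-- def _infer_nation_from_vehicle_id(veh_id: str) -> Optional[str]:
--     # Decision tree on the first character; a second-character check only where
--     # the first character is ambiguous (U, G, C, P, I).
--     v = (veh_id or "").strip()
--     c = v[0:1]
--     d = v[1:2]
--     if c == "U":
--         return "intunion" if d == "n" else None
--     if c == "G":
--         return "uk" if d == "B" else "germany"
--     if c == "C":
--         if d == "h":
--             return "china"
--         if d == "z":
--             return "czech"
--         return None
--     if c == "P":
--         return "poland" if d == "l" else None
--     if c == "I":
--         return "italy" if d == "t" else None
--     if c == "S":
--         return "sweden"
--     if c == "J":
--         return "japan"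
--     if c == "F":
--         return "france"
--     if c == "R":
--         return "ussr"
--     if c == "A":
--         return "usa"
--     return None
-- ===== Notes on version B (the rewrite author's own statement) =====
-- stated objective: simpler
-- what changed: Replaced the two ordered startswith-scan loops (each testing p+'_' and p) over a 12-entry map with a branching decision tree on the first character of the stripped id, consulting the second character only for the ambiguous first letters U, G, C, P, I.
import Mathlib
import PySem

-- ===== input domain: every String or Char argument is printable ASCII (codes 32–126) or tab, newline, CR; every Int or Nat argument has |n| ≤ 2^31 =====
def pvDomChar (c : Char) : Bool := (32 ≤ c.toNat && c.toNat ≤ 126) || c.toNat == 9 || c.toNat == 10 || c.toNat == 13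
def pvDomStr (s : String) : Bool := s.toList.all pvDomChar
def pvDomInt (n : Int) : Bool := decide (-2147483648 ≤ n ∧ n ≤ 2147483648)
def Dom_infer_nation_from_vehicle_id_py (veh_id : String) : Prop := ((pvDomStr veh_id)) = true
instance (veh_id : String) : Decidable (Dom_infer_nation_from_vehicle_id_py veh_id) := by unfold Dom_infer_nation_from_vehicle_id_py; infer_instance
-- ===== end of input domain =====

-- B replaces A's two ordered startswith-scan loops over a 12-entry map with a decision tree
-- on the first character (second character checked only where the first is ambiguous); simpler, same result.

-- ===== PORT A =====
-- prefix_map of A (12 entries, insertion order as in the Python)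
def pvPrefixMap : PySem.Dict String String := PySem.Dict.mk
  [("Un", "intunion"), ("GB", "uk"), ("Ch", "china"), ("Cz", "czech"), ("Pl", "poland"), ("It", "italy"),
   ("S", "sweden"), ("J", "japan"), ("F", "france"), ("G", "germany"), ("R", "ussr"), ("A", "usa")]

-- the body of A after `v = (veh_id or "").strip()` (`"" or ""` is `""`, so `or ""` is the identity on str);
-- `return prefix_map[p]` is `pvPrefixMap.get? p`: every scanned p is a key, so KeyError is unreachable
def pvACore (v : String) : Option String :=
  match ["Un", "GB", "Ch", "Cz", "Pl", "It"].find?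
      (fun p => PySem.Str.startswith v (p ++ "_") || PySem.Str.startswith v p) with
  | some p => pvPrefixMap.get? p
  | none =>
    match ["S", "J", "F", "G", "R", "A"].find?
        (fun p => PySem.Str.startswith v (p ++ "_") || PySem.Str.startswith v p) with
    | some p => pvPrefixMap.get? p
    | none => none

def infer_nation_from_vehicle_id_py (veh_id : String) : Option String :=
  pvACore (PySem.Str.strip veh_id)

-- ===== PORT B =====
-- the body of B after `v = (veh_id or "").strip()`: c = v[0:1], d = v[1:2], then a decision tree on c
def pvBCore (v : String) : Option String :=
  let c := PySem.Str.slice v (some 0) (some 1)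
  let d := PySem.Str.slice v (some 1) (some 2)
  if c = "U" then (if d = "n" then some "intunion" else none)
  else if c = "G" then (if d = "B" then some "uk" else some "germany")
  else if c = "C" then
    (if d = "h" then some "china" else if d = "z" then some "czech" else none)
  else if c = "P" then (if d = "l" then some "poland" else none)
  else if c = "I" then (if d = "t" then some "italy" else none)
  else if c = "S" then some "sweden"
  else if c = "J" then some "japan"
  else if c = "F" then some "france"
  else if c = "R" then some "ussr"
  else if c = "A" then some "usa"
  else none

def infer_nation_from_vehicle_id_py_alt (veh_id : String) : Option String :=
  pvBCore (PySem.Str.strip veh_id)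

-- ===== PRECONDITION & SPEC =====
def Spec_infer_nation_from_vehicle_id_py (veh_id : String) (out : Option String) : Prop := out = infer_nation_from_vehicle_id_py_alt veh_id
instance (veh_id : String) (out : Option String) : Decidable (Spec_infer_nation_from_vehicle_id_py veh_id out) := by unfold Spec_infer_nation_from_vehicle_id_py; infer_instance

-- ===== CLAIM (what is proved, stated in full; the proofs are below) =====
def Claim_equal_infer_nation_from_vehicle_id_py : Prop := ∀ (veh_id : String), Dom_infer_nation_from_vehicle_id_py veh_id → Spec_infer_nation_from_vehicle_id_py veh_id (infer_nation_from_vehicle_id_py veh_id)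

-- ===== LEMMAS AND PROOFS =====

-- what both cores compute on a one-character string
def pvCanon1 (c : Char) : Option String :=
  if c = 'S' then some "sweden"
  else if c = 'J' then some "japan"
  else if c = 'F' then some "france"
  else if c = 'G' then some "germany"
  else if c = 'R' then some "ussr"
  else if c = 'A' then some "usa"
  else none

-- what both cores compute on a string of length ≥ 2 with first two characters c, d
def pvCanon2 (c d : Char) : Option String :=
  if c = 'U' ∧ d = 'n' then some "intunion"
  else if c = 'G' ∧ d = 'B' then some "uk"
  else if c = 'C' ∧ d = 'h' then some "china"
  else if c = 'C' ∧ d = 'z' then some "czech"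
  else if c = 'P' ∧ d = 'l' then some "poland"
  else if c = 'I' ∧ d = 't' then some "italy"
  else pvCanon1 c

theorem pvA1 (c : Char) : pvACore (String.ofList [c]) = pvCanon1 c := by
  simp [pvACore, pvCanon1, List.find?, PySem.Chars.startswith, List.isPrefixOf, beq_eq_decide,
    (show "Un".toList = ['U','n'] from rfl), (show "GB".toList = ['G','B'] from rfl),
    (show "Ch".toList = ['C','h'] from rfl), (show "Cz".toList = ['C','z'] from rfl),
    (show "Pl".toList = ['P','l'] from rfl), (show "It".toList = ['I','t'] from rfl),
    (show "S".toList = ['S'] from rfl), (show "J".toList = ['J'] from rfl),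
    (show "F".toList = ['F'] from rfl), (show "G".toList = ['G'] from rfl),
    (show "R".toList = ['R'] from rfl), (show "A".toList = ['A'] from rfl)]
  by_cases h1 : c = 'S' <;> by_cases h2 : c = 'J' <;> by_cases h3 : c = 'F' <;>
    by_cases h4 : c = 'G' <;> by_cases h5 : c = 'R' <;> by_cases h6 : c = 'A' <;>
    simp_all [pvPrefixMap, PySem.Dict.get?, eq_comm]

set_option maxHeartbeats 2000000 in
theorem pvA2 (c d : Char) (r : List Char) : pvACore (String.ofList (c::d::r)) = pvCanon2 c d := by
  simp [pvACore, pvCanon2, pvCanon1, List.find?, PySem.Chars.startswith, List.isPrefixOf,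
    beq_eq_decide,
    (show "Un".toList = ['U','n'] from rfl), (show "GB".toList = ['G','B'] from rfl),
    (show "Ch".toList = ['C','h'] from rfl), (show "Cz".toList = ['C','z'] from rfl),
    (show "Pl".toList = ['P','l'] from rfl), (show "It".toList = ['I','t'] from rfl),
    (show "S".toList = ['S'] from rfl), (show "J".toList = ['J'] from rfl),
    (show "F".toList = ['F'] from rfl), (show "G".toList = ['G'] from rfl),
    (show "R".toList = ['R'] from rfl), (show "A".toList = ['A'] from rfl)]
  by_cases hU : 'U' = c <;> by_cases hG : 'G' = c <;> by_cases hC : 'C' = c <;>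
  by_cases hP : 'P' = c <;> by_cases hI : 'I' = c <;>
  by_cases h1 : c = 'S' <;> by_cases h2 : c = 'J' <;> by_cases h3 : c = 'F' <;>
  by_cases h5 : c = 'R' <;> by_cases h6 : c = 'A' <;>
  simp_all [pvPrefixMap, PySem.Dict.get?, List.find?, beq_eq_decide, eq_comm] <;>
  by_cases k1 : 'n' = d <;> by_cases k2 : 'B' = d <;> by_cases k3 : 'h' = d <;>
  by_cases k4 : 'z' = d <;> by_cases k5 : 'l' = d <;> by_cases k6 : 't' = d <;>
  simp_all [eq_comm]

theorem pvB1 (c : Char) : pvBCore (String.ofList [c]) = pvCanon1 c := by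
  simp only [pvBCore, pvCanon1, ← String.toList_inj]
  simp [PySem.Str.slice, PySem.List.slice, PySem.List.clampIdx,
    (show "U".toList = ['U'] from rfl), (show "G".toList = ['G'] from rfl),
    (show "C".toList = ['C'] from rfl), (show "P".toList = ['P'] from rfl),
    (show "I".toList = ['I'] from rfl), (show "S".toList = ['S'] from rfl),
    (show "J".toList = ['J'] from rfl), (show "F".toList = ['F'] from rfl),
    (show "R".toList = ['R'] from rfl), (show "A".toList = ['A'] from rfl)]
  by_cases hU : c = 'U' <;> by_cases hG : c = 'G' <;> by_cases hC : c = 'C' <;>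
  by_cases hP : c = 'P' <;> by_cases hI : c = 'I' <;>
  by_cases h1 : c = 'S' <;> by_cases h2 : c = 'J' <;> by_cases h3 : c = 'F' <;>
  by_cases h5 : c = 'R' <;> by_cases h6 : c = 'A' <;> simp_all

set_option maxHeartbeats 2000000 in
theorem pvB2 (c d : Char) (r : List Char) : pvBCore (String.ofList (c::d::r)) = pvCanon2 c d := by
  simp only [pvBCore, pvCanon2, pvCanon1, ← String.toList_inj]
  simp [PySem.Str.slice, PySem.List.slice, PySem.List.clampIdx,
    (show "U".toList = ['U'] from rfl), (show "G".toList = ['G'] from rfl),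
    (show "C".toList = ['C'] from rfl), (show "P".toList = ['P'] from rfl),
    (show "I".toList = ['I'] from rfl), (show "S".toList = ['S'] from rfl),
    (show "J".toList = ['J'] from rfl), (show "F".toList = ['F'] from rfl),
    (show "R".toList = ['R'] from rfl), (show "A".toList = ['A'] from rfl),
    (show "n".toList = ['n'] from rfl), (show "B".toList = ['B'] from rfl),
    (show "h".toList = ['h'] from rfl), (show "z".toList = ['z'] from rfl),
    (show "l".toList = ['l'] from rfl), (show "t".toList = ['t'] from rfl)]
  by_cases hU : c = 'U' <;> by_cases hG : c = 'G' <;> by_cases hC : c = 'C' <;>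
  by_cases hP : c = 'P' <;> by_cases hI : c = 'I' <;>
  by_cases h1 : c = 'S' <;> by_cases h2 : c = 'J' <;> by_cases h3 : c = 'F' <;>
  by_cases h5 : c = 'R' <;> by_cases h6 : c = 'A' <;>
  simp_all <;>
  by_cases k1 : d = 'n' <;> by_cases k2 : d = 'B' <;> by_cases k3 : d = 'h' <;>
  by_cases k4 : d = 'z' <;> by_cases k5 : d = 'l' <;> by_cases k6 : d = 't' <;>
  simp_all

theorem pvCore_eq (s : String) : pvACore s = pvBCore s := by
  obtain ⟨l, rfl⟩ : ∃ l, s = String.ofList l := ⟨s.toList, (String.ofList_toList (s := s)).symm⟩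
  match l with
  | [] => decide
  | [c] => rw [pvA1, pvB1]
  | c :: d :: r => rw [pvA2, pvB2]

-- ===== VERDICT (by name: the statement is the Claim_ definition above) =====
theorem infer_nation_from_vehicle_id_py_spec : Claim_equal_infer_nation_from_vehicle_id_py := by
  intro veh_id _
  unfold Spec_infer_nation_from_vehicle_id_py infer_nation_from_vehicle_id_py infer_nation_from_vehicle_id_py_alt
  exact pvCore_eq (PySem.Str.strip veh_id)
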